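-- pv_equiv track=rewrite | github.com/Jerempire/gym-anything | benchmarks/cua_world/environments/libreoffice_calc_env/tasks/transaction_anomaly_detector/verifier.py | analyze_formula_sophistication
-- ===== SOURCE A (Python) =====
-- from typing import Dict, Set, List, Tuple
--
-- def analyze_formula_sophistication(sheet_data: Dict, sheet_name: str) -> Dict[str, bool]:
--     """
--     Analyze the sophistication of formulas used.
--
--     Returns:
--         Dict with boolean flags for different formula types
--     """
--     analysis = {
--         'uses_countifs': False,
--         'uses_if': False,
--         'uses_statistics': False,
--         'uses_date_functions': False,
--         'has_complex_formulas': False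
--     }
--
--     if not sheet_data or 'sheets' not in sheet_data:
--         return analysis
--
--     if sheet_name not in sheet_data['sheets']:
--         return analysis
--
--     rows = sheet_data['sheets'][sheet_name]
--
--     for row in rows:
--         for cell in row:
--             formula = cell.get('formula') if isinstance(cell, dict) else None
--             if formula:
--                 formula_upper = formula.upper()
--
--                 if 'COUNTIFS' in formula_upper or 'COUNTIF' in formula_upper:
--                     analysis['uses_countifs'] = True
--
--                 if 'IF(' in formula_upper:
--                     analysis['uses_if'] = True
--
--                 if any(func in formula_upper for func in ['AVERAGE', 'STDEV', 'MEAN', 'MEDIAN']):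
--                     analysis['uses_statistics'] = True
--
--                 if any(func in formula_upper for func in ['DATE', 'TODAY', 'NOW', 'YEAR', 'MONTH', 'DAY']):
--                     analysis['uses_date_functions'] = True
--
--                 # Complex formula: nested functions or long formulas
--                 if formula_upper.count('(') >= 2 or len(formula) > 30:
--                     analysis['has_complex_formulas'] = True
--
--     return analysis
-- ===== SOURCE B (Python) =====
-- def analyze_formula_sophistication(sheet_data, sheet_name):
--     """Gather-then-reduce: one pass builds the (formula, upper) table,
--     then each flag is its own reduction over that table."""
--     analysis = {
--         'uses_countifs': False,
--         'uses_if': False,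
--         'uses_statistics': False,
--         'uses_date_functions': False,
--         'has_complex_formulas': False
--     }
--
--     if not sheet_data or 'sheets' not in sheet_data:
--         return analysis
--
--     if sheet_name not in sheet_data['sheets']:
--         return analysis
--
--     rows = sheet_data['sheets'][sheet_name]
--
--     formulas = [(f, f.upper())
--                 for row in rows
--                 for cell in row
--                 for f in [cell.get('formula') if isinstance(cell, dict) else None]
--                 if f]
--
--     analysis['uses_countifs'] = any(
--         'COUNTIFS' in u or 'COUNTIF' in u for _, u in formulas)
--     analysis['uses_if'] = any('IF(' in u for _, u in formulas)
--     analysis['uses_statistics'] = any(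
--         any(func in u for func in ['AVERAGE', 'STDEV', 'MEAN', 'MEDIAN'])
--         for _, u in formulas)
--     analysis['uses_date_functions'] = any(
--         any(func in u for func in ['DATE', 'TODAY', 'NOW', 'YEAR', 'MONTH', 'DAY'])
--         for _, u in formulas)
--     analysis['has_complex_formulas'] = any(
--         u.count('(') >= 2 or len(f) > 30 for f, u in formulas)
--
--     return analysis
-- ===== Notes on version B (the rewrite author's own statement) =====
-- stated objective: alternative
-- what changed: A interleaves all five flag updates inside one nested row/cell loop; B first builds a flat (formula, upper) table in a single comprehension and then computes each of the five flags by its own any(...) reduction over that table.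
import Mathlib
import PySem

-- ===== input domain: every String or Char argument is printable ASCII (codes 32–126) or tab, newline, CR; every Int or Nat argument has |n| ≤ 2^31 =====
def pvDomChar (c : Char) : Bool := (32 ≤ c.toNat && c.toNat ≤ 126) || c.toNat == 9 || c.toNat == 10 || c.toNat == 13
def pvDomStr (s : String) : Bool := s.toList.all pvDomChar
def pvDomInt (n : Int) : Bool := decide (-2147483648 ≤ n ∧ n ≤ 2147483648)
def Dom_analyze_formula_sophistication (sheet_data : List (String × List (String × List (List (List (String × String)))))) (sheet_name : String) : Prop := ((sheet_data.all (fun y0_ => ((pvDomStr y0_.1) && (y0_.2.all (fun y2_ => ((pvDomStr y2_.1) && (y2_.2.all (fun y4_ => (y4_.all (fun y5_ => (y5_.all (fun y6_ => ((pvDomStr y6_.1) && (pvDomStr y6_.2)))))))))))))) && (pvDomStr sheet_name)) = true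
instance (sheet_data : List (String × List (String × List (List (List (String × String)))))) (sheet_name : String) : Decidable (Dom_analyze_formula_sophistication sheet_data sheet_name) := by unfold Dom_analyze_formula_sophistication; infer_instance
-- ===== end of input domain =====

-- B replaces A's single interleaved flag-setting loop by a gather pass building a (formula, upper)
-- table followed by five separate any-reductions (objective: alternative decomposition, same cost).

-- ===== PORT A =====
-- the five string tests of A's branches (shared verbatim by both sources)
def pvTestCountif (u : String) : Bool := PySem.Str.isIn "COUNTIFS" u || PySem.Str.isIn "COUNTIF" u
def pvTestIf (u : String) : Bool := PySem.Str.isIn "IF(" u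
def pvTestStats (u : String) : Bool := ["AVERAGE", "STDEV", "MEAN", "MEDIAN"].any (fun func => PySem.Str.isIn func u)
def pvTestDate (u : String) : Bool := ["DATE", "TODAY", "NOW", "YEAR", "MONTH", "DAY"].any (fun func => PySem.Str.isIn func u)
def pvTestComplex (f u : String) : Bool := decide (2 ≤ PySem.Str.count u "(") || decide (30 < PySem.Str.len f)

-- A's per-cell body: update the five flags in place
def pvStepA (st : Bool × Bool × Bool × Bool × Bool) (cell : List (String × String)) : Bool × Bool × Bool × Bool × Bool :=
  match (PySem.Dict.mk cell).get? "formula" with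
  | none => st
  | some f =>
    if f = "" then st
    else
      let u := PySem.Str.upper f
      ⟨st.1 || pvTestCountif u, st.2.1 || pvTestIf u, st.2.2.1 || pvTestStats u,
       st.2.2.2.1 || pvTestDate u, st.2.2.2.2 || pvTestComplex f u⟩

def pvRenderA (st : Bool × Bool × Bool × Bool × Bool) : List (String × Bool) :=
  [("uses_countifs", st.1), ("uses_if", st.2.1), ("uses_statistics", st.2.2.1),
   ("uses_date_functions", st.2.2.2.1), ("has_complex_formulas", st.2.2.2.2)]

def analyze_formula_sophistication (sheet_data : List (String × List (String × List (List (List (String × String)))))) (sheet_name : String) : List (String × Bool) :=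
  if sheet_data = [] then pvRenderA (false, false, false, false, false)
  else
    match (PySem.Dict.mk sheet_data).get? "sheets" with
    | none => pvRenderA (false, false, false, false, false)
    | some sheets =>
      match (PySem.Dict.mk sheets).get? sheet_name with
      | none => pvRenderA (false, false, false, false, false)
      | some rows =>
        pvRenderA (rows.foldl (fun st row => row.foldl pvStepA st) (false, false, false, false, false))

-- ===== PORT B =====
-- the gather pass: (formula, formula.upper()) for every truthy formula, in order
def pvFormulas (rows : List (List (List (String × String)))) : List (String × String) :=
  rows.flatMap (fun row => row.filterMap (fun cell =>
    match (PySem.Dict.mk cell).get? "formula" with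
    | none => none
    | some f => if f = "" then none else some (f, PySem.Str.upper f)))

def analyze_formula_sophistication_alt (sheet_data : List (String × List (String × List (List (List (String × String)))))) (sheet_name : String) : List (String × Bool) :=
  if sheet_data = [] then
    [("uses_countifs", false), ("uses_if", false), ("uses_statistics", false),
     ("uses_date_functions", false), ("has_complex_formulas", false)]
  else
    match (PySem.Dict.mk sheet_data).get? "sheets" with
    | none =>
      [("uses_countifs", false), ("uses_if", false), ("uses_statistics", false),
       ("uses_date_functions", false), ("has_complex_formulas", false)]
    | some sheets =>
      match (PySem.Dict.mk sheets).get? sheet_name with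
      | none =>
        [("uses_countifs", false), ("uses_if", false), ("uses_statistics", false),
         ("uses_date_functions", false), ("has_complex_formulas", false)]
      | some rows =>
        let fs := pvFormulas rows
        [("uses_countifs", fs.any (fun p => pvTestCountif p.2)),
         ("uses_if", fs.any (fun p => pvTestIf p.2)),
         ("uses_statistics", fs.any (fun p => pvTestStats p.2)),
         ("uses_date_functions", fs.any (fun p => pvTestDate p.2)),
         ("has_complex_formulas", fs.any (fun p => pvTestComplex p.1 p.2))]

-- ===== PRECONDITION & SPEC =====
def Spec_analyze_formula_sophistication (sheet_data : List (String × List (String × List (List (List (String × String)))))) (sheet_name : String) (out : List (String × Bool)) : Prop := out = analyze_formula_sophistication_alt sheet_data sheet_name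
instance (sheet_data : List (String × List (String × List (List (List (String × String)))))) (sheet_name : String) (out : List (String × Bool)) : Decidable (Spec_analyze_formula_sophistication sheet_data sheet_name out) := by unfold Spec_analyze_formula_sophistication; infer_instance

-- ===== CLAIM (what is proved, stated in full; the proofs are below) =====
def Claim_equal_analyze_formula_sophistication : Prop := ∀ (sheet_data : List (String × List (String × List (List (List (String × String)))))) (sheet_name : String), Dom_analyze_formula_sophistication sheet_data sheet_name → Spec_analyze_formula_sophistication sheet_data sheet_name (analyze_formula_sophistication sheet_data sheet_name)

-- ===== LEMMAS AND PROOFS =====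
-- per-cell extraction used by pvFormulas
def pvCellF (cell : List (String × String)) : Option (String × String) :=
  match (PySem.Dict.mk cell).get? "formula" with
  | none => none
  | some f => if f = "" then none else some (f, PySem.Str.upper f)

theorem pvFoldl_row (row : List (List (String × String))) (st : Bool × Bool × Bool × Bool × Bool) :
    row.foldl pvStepA st =
      ⟨st.1 || (row.filterMap pvCellF).any (fun p => pvTestCountif p.2),
       st.2.1 || (row.filterMap pvCellF).any (fun p => pvTestIf p.2),
       st.2.2.1 || (row.filterMap pvCellF).any (fun p => pvTestStats p.2),
       st.2.2.2.1 || (row.filterMap pvCellF).any (fun p => pvTestDate p.2),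
       st.2.2.2.2 || (row.filterMap pvCellF).any (fun p => pvTestComplex p.1 p.2)⟩ := by
  induction row generalizing st with
  | nil => simp
  | cons cell rest ih =>
    obtain ⟨a, b, c, d, e⟩ := st
    simp only [List.foldl_cons, List.filterMap_cons, ih, pvStepA, pvCellF]
    cases h : (PySem.Dict.mk cell).get? "formula" with
    | none => simp
    | some f =>
      by_cases hf : f = "" <;> simp [hf, Bool.or_assoc]

theorem pvFoldl_rows (rows : List (List (List (String × String)))) (st : Bool × Bool × Bool × Bool × Bool) :
    rows.foldl (fun st row => row.foldl pvStepA st) st =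
      ⟨st.1 || (pvFormulas rows).any (fun p => pvTestCountif p.2),
       st.2.1 || (pvFormulas rows).any (fun p => pvTestIf p.2),
       st.2.2.1 || (pvFormulas rows).any (fun p => pvTestStats p.2),
       st.2.2.2.1 || (pvFormulas rows).any (fun p => pvTestDate p.2),
       st.2.2.2.2 || (pvFormulas rows).any (fun p => pvTestComplex p.1 p.2)⟩ := by
  induction rows generalizing st with
  | nil => simp [pvFormulas]
  | cons row rest ih =>
    obtain ⟨a, b, c, d, e⟩ := st
    rw [List.foldl_cons, pvFoldl_row, ih]
    simp [pvFormulas, pvCellF, Bool.or_assoc]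

-- ===== VERDICT (by name: the statement is the Claim_ definition above) =====
theorem analyze_formula_sophistication_spec : Claim_equal_analyze_formula_sophistication := by
  intro sd sn _
  unfold Spec_analyze_formula_sophistication analyze_formula_sophistication analyze_formula_sophistication_alt
  by_cases h0 : sd = []
  · simp [h0, pvRenderA]
  · rcases hs : (PySem.Dict.mk sd).get? "sheets" with _ | sheets
    · simp [h0, pvRenderA]
    · rcases hr : (PySem.Dict.mk sheets).get? sn with _ | rows
      · simp [h0, hr, pvRenderA]
      · simp [h0, hr, pvRenderA, pvFoldl_rows]
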